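-- pv_equiv track=rewrite | github.com/visinf/ART | lavis/art/utils.py | sample_items
-- ===== SOURCE A (Python) =====
-- def sample_items(p_count_dict, budget):
--     """
--     Distributes `budget` samples evenly over items in `p_count_dict`.
--     Returns a list of selected items and a dict of quantities per item.
--     """
--     item_freq_dict = p_count_dict.copy()
--     sorted_items = sorted(item_freq_dict.items(), key=lambda x: x[1], reverse=True)
--     selected_items = []
--     selected_quantity_dict = {}
--     index = 0
--     while budget > 0:
--         item = sorted_items[index % len(sorted_items)][0]
--         frequency = item_freq_dict[item]
--         if frequency > 0:
--             selected_items.append(item)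
--             selected_quantity_dict[item] = selected_quantity_dict.get(item, 0) + 1
--             item_freq_dict[item] -= 1
--             budget -= 1
--         index += 1
--     return selected_items, selected_quantity_dict
-- ===== SOURCE B (Python) =====
-- def sample_items(p_count_dict, budget):
--     """
--     Distributes `budget` samples evenly over items in `p_count_dict`.
--     Returns a list of selected items and a dict of quantities per item.
--
--     Round-based re-implementation: keeps only the items that still have a
--     positive remaining frequency ("active"), takes one whole round of them at
--     a time and compacts the exhausted ones away, so dead entries are never
--     rescanned.
--     """
--     order = sorted(p_count_dict.items(), key=lambda kv: kv[1], reverse=True)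
--     active = [(k, v) for k, v in order if v > 0]
--     selected = []
--     while budget > 0 and active:
--         if budget < len(active):
--             selected.extend(k for k, _ in active[:budget])
--             budget = 0
--         else:
--             selected.extend(k for k, _ in active)
--             budget -= len(active)
--             active = [(k, v - 1) for k, v in active if v > 1]
--     quantities = {}
--     for k in selected:
--         quantities[k] = quantities.get(k, 0) + 1
--     return selected, quantities
-- ===== Notes on version B (the rewrite author's own statement) =====
-- stated objective: alternative
-- what changed: A walks the sorted item list cyclically one index at a time, rescanning exhausted (zero/negative) entries on every cycle; B keeps only the still-positive items in a compacted active list, consumes whole rounds of it at once and drops exhausted items, then builds the quantity dict in one counting pass over the selections.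
import Mathlib
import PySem

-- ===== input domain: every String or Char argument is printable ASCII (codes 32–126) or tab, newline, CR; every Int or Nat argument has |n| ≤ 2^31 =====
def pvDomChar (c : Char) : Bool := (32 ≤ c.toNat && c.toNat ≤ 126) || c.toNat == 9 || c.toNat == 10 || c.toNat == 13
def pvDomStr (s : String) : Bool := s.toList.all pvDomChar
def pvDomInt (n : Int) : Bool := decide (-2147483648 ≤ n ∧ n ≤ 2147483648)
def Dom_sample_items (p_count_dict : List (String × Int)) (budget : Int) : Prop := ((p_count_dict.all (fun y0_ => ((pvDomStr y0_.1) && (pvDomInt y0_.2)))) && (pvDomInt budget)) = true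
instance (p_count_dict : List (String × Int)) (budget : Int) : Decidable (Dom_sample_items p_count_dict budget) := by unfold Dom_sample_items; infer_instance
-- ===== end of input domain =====

-- B changes the round-robin walk over ALL items (A rescans exhausted entries every cycle) into
-- whole rounds over a compacted list of still-positive items, so dead entries are never rescanned.

-- ===== PORT A =====
-- the while loop: state (item_freq_dict, index, budget, selected_items, selected_quantity_dict);
-- fuel makes the recursion total — inside Pre_ the supplied fuel is proved sufficient (the loop
-- terminates in Python exactly on Pre_); `getD`s are totality guards for lookups Python never misses.
def loopA (s : List (String × Int)) (fuel : Nat) (d : PySem.Dict String Int) (index : Nat)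
    (budget : Int) (sel : List String) (qty : PySem.Dict String Int) :
    List String × PySem.Dict String Int :=
  match fuel with
  | 0 => (sel, qty)
  | f + 1 =>
    if 0 < budget then
      -- sorted_items[index % len(sorted_items)][0]; Nat % is exact here (both operands nonnegative)
      let item := (s.getD (index % s.length) ("", 0)).1
      let frequency := d.getD item 0                       -- item_freq_dict[item]
      if 0 < frequency then
        loopA s f (d.insert item (frequency - 1)) (index + 1) (budget - 1)
          (sel ++ [item]) (qty.insert item (qty.getD item 0 + 1))
      else
        loopA s f d (index + 1) budget sel qty
    else (sel, qty)

def sample_items (p_count_dict : List (String × Int)) (budget : Int) :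
    List String × (List (String × Int)) :=
  let item_freq_dict := PySem.Dict.ofList p_count_dict    -- the dict argument (copy)
  let sorted_items := PySem.List.sorted item_freq_dict.items (fun x => x.2) true
  let r := loopA sorted_items (sorted_items.length * (budget.toNat + 1))
    item_freq_dict 0 budget [] PySem.Dict.empty
  (r.1, r.2.items)

-- ===== PORT B =====
-- the while loop over the compacted `active` list (pairs key, remaining frequency)
def loopB (active : List (String × Int)) (budget : Int) (sel : List String) : List String :=
  if h : 0 < budget ∧ active ≠ [] then
    if budget < (active.length : Int) then
      sel ++ (active.take budget.toNat).map (·.1)          -- extend with active[:budget]; budget = 0 ends the loop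
    else
      loopB ((active.filter (fun p => 1 < p.2)).map (fun p => (p.1, p.2 - 1)))
        (budget - active.length) (sel ++ active.map (·.1))
  else sel
termination_by budget.toNat
decreasing_by
  have : active.length ≠ 0 := fun hl => h.2 (List.length_eq_zero_iff.mp hl)
  omega

def sample_items_alt (p_count_dict : List (String × Int)) (budget : Int) :
    List String × (List (String × Int)) :=
  let order := PySem.List.sorted (PySem.Dict.ofList p_count_dict).items (fun kv => kv.2) true
  let active := order.filter (fun p => 0 < p.2)
  let selected := loopB active budget []
  let quantities := selected.foldl (fun q k => q.insert k (q.getD k 0 + 1))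
    (PySem.Dict.empty : PySem.Dict String Int)
  (selected, quantities.items)

-- ===== PRECONDITION & SPEC =====
-- A's while loop terminates exactly when the budget does not exceed the total positive frequency
-- (otherwise Python loops forever, or raises ZeroDivisionError on an empty dict with positive budget).
def Pre_sample_items (p_count_dict : List (String × Int)) (budget : Int) : Prop :=
  budget ≤ (((PySem.Dict.ofList p_count_dict).items.map (fun p => max p.2 0)).sum : Int)
instance (p_count_dict : List (String × Int)) (budget : Int) : Decidable (Pre_sample_items p_count_dict budget) := by unfold Pre_sample_items; infer_instance

def pvWitness_sample_items : (List (String × Int)) × Int := ([("a", 2), ("b", 1)], 3)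

def Spec_sample_items (p_count_dict : List (String × Int)) (budget : Int) (out : List String × (List (String × Int))) : Prop := out = sample_items_alt p_count_dict budget
instance (p_count_dict : List (String × Int)) (budget : Int) (out : List String × (List (String × Int))) : Decidable (Spec_sample_items p_count_dict budget out) := by unfold Spec_sample_items; infer_instance

-- ===== CLAIM (what is proved, stated in full; the proofs are below) =====
def Claim_equal_sample_items : Prop := ∀ (p_count_dict : List (String × Int)) (budget : Int), Dom_sample_items p_count_dict budget → Pre_sample_items p_count_dict budget → Spec_sample_items p_count_dict budget (sample_items p_count_dict budget)

-- ===== LEMMAS AND PROOFS =====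

-- proof-side abbreviations
def qtyAcc (qty : PySem.Dict String Int) (l : List String) : PySem.Dict String Int :=
  l.foldl (fun q k => q.insert k (q.getD k 0 + 1)) qty

def decAll (d : PySem.Dict String Int) (act : List (String × Int)) : PySem.Dict String Int :=
  act.foldl (fun dd p => dd.insert p.1 (dd.getD p.1 0 - 1)) d

def actOf (s : List (String × Int)) (d : PySem.Dict String Int) : List (String × Int) :=
  s.filter (fun p => decide (0 < d.getD p.1 0))

def actMap (s : List (String × Int)) (d : PySem.Dict String Int) : List (String × Int) :=
  (actOf s d).map (fun p => (p.1, d.getD p.1 0))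

def posSum (s : List (String × Int)) (d : PySem.Dict String Int) : Int :=
  (s.map (fun p => max (d.getD p.1 0) 0)).sum

lemma loopA_nonpos (s : List (String × Int)) (fuel : Nat) (d : PySem.Dict String Int)
    (index : Nat) (budget : Int) (sel : List String) (qty : PySem.Dict String Int)
    (hb : ¬ 0 < budget) : loopA s fuel d index budget sel qty = (sel, qty) := by
  cases fuel <;> simp [loopA, hb]

lemma getD_from_drop (l : List (String × Int)) (j : Nat) (p : String × Int)
    (t : List (String × Int)) (h : l.drop j = p :: t) : l.getD j ("", 0) = p := by
  have h0 := List.getElem?_drop (xs := l) (i := j) (j := 0)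
  simp [h] at h0
  simp [List.getD, ← h0]

lemma drop_succ_of_drop (l : List (String × Int)) (j : Nat) (p : String × Int)
    (t : List (String × Int)) (h : l.drop j = p :: t) : l.drop (j + 1) = t := by
  have hd : l.drop (j + 1) = (l.drop j).drop 1 := by rw [List.drop_drop]
  simp [hd, h]

lemma mod_succ_lt (i n : Nat) (h : i % n + 1 < n) : (i + 1) % n = i % n + 1 := by
  conv_lhs => rw [← Nat.div_add_mod i n]
  rw [Nat.add_assoc, Nat.mul_add_mod]
  exact Nat.mod_eq_of_lt h

lemma loopA_succ (s : List (String × Int)) (f : Nat) (d : PySem.Dict String Int) (index : Nat)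
    (budget : Int) (sel : List String) (qty : PySem.Dict String Int) :
    loopA s (f + 1) d index budget sel qty =
      if 0 < budget then
        (if 0 < d.getD (s.getD (index % s.length) ("", 0)).1 0 then
          loopA s f
            (d.insert (s.getD (index % s.length) ("", 0)).1
              (d.getD (s.getD (index % s.length) ("", 0)).1 0 - 1))
            (index + 1) (budget - 1) (sel ++ [(s.getD (index % s.length) ("", 0)).1])
            (qty.insert (s.getD (index % s.length) ("", 0)).1
              (qty.getD (s.getD (index % s.length) ("", 0)).1 0 + 1))
        else loopA s f d (index + 1) budget sel qty)
      else (sel, qty) := rfl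

-- one cycle of A's loop, positions (index % n) .. n-1, processed as a block
lemma loopA_chunk (s : List (String × Int)) :
    ∀ (t : List (String × Int)) (index : Nat) (d : PySem.Dict String Int) (budget : Int)
      (sel : List String) (qty : PySem.Dict String Int) (fuel : Nat),
      s.drop (index % s.length) = t →
      index % s.length + t.length = s.length →
      (t.map Prod.fst).Nodup →
      t.length ≤ fuel →
      loopA s fuel d index budget sel qty =
        (if budget ≤ ((actOf t d).length : Int) then
          (sel ++ ((actOf t d).take budget.toNat).map (·.1),
            qtyAcc qty (((actOf t d).take budget.toNat).map (·.1)))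
        else
          loopA s (fuel - t.length) (decAll d (actOf t d)) (index + t.length)
            (budget - (actOf t d).length) (sel ++ (actOf t d).map (·.1))
            (qtyAcc qty ((actOf t d).map (·.1)))) := by
  intro t
  induction t with
  | nil =>
    intro index d budget sel qty fuel _ _ _ _
    by_cases hb : budget ≤ 0
    · simp [actOf, qtyAcc, hb, loopA_nonpos s fuel d index budget sel qty (by omega)]
    · simp [actOf, qtyAcc, hb, decAll]
  | cons p t' ih =>
    intro index d budget sel qty fuel hdrop hlen hnd hfuel
    have hlen' : index % s.length + (t'.length + 1) = s.length := by simpa using hlen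
    have hitem : s.getD (index % s.length) ("", 0) = p := getD_from_drop _ _ _ _ hdrop
    obtain ⟨f, rfl⟩ : ∃ f, fuel = f + 1 := ⟨fuel - 1, by simp at hfuel; omega⟩
    have hndt : (t'.map Prod.fst).Nodup := (List.nodup_cons.mp (by simpa using hnd)).2
    have hph : p.1 ∉ t'.map Prod.fst := (List.nodup_cons.mp (by simpa using hnd)).1
    rw [loopA_succ, hitem]
    by_cases hb : 0 < budget
    · rw [if_pos hb]
      by_cases hfreq : 0 < d.getD p.1 0
      · rw [if_pos hfreq]
        have hact : actOf (p :: t') d = p :: actOf t' d := by simp [actOf, hfreq]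
        have hgd : ∀ q ∈ t', (d.insert p.1 (d.getD p.1 0 - 1)).getD q.1 0 = d.getD q.1 0 := by
          intro q hq
          rw [PySem.Dict.getD_insert]
          have : q.1 ≠ p.1 := fun h => hph (h ▸ List.mem_map.mpr ⟨q, hq, rfl⟩)
          simp [this]
        have hact' : actOf t' (d.insert p.1 (d.getD p.1 0 - 1)) = actOf t' d :=
          List.filter_congr (fun q hq => by simp [hgd q hq])
        by_cases ht' : t' = []
        · subst ht'
          have hact0 : actOf ([] : List (String × Int)) d = [] := rfl
          by_cases hble : budget ≤ ((actOf (p :: []) d).length : Int)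
          · have hb1 : budget = 1 := by rw [hact, hact0] at hble; simp at hble; omega
            subst hb1
            rw [if_pos hble, loopA_nonpos _ _ _ _ _ _ _ (by omega)]
            simp [hact, hact0, qtyAcc]
          · rw [if_neg hble]
            have h1 : decAll d (actOf (p :: []) d) = d.insert p.1 (d.getD p.1 0 - 1) := by
              rw [hact, hact0]; rfl
            have h2 : budget - ((actOf (p :: []) d).length : Int) = budget - 1 := by
              rw [hact, hact0]; simp
            rw [h1, h2, hact, hact0]
            simp [qtyAcc]
        · have hlt : index % s.length + 1 < s.length := by
            have : 0 < t'.length := List.length_pos_iff.mpr ht'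
            omega
          have hmod : (index + 1) % s.length = index % s.length + 1 :=
            mod_succ_lt index s.length hlt
          have hdrop' : s.drop ((index + 1) % s.length) = t' := by
            rw [hmod]; exact drop_succ_of_drop _ _ _ _ hdrop
          rw [ih (index + 1) (d.insert p.1 (d.getD p.1 0 - 1)) (budget - 1) (sel ++ [p.1])
            (qty.insert p.1 (qty.getD p.1 0 + 1)) f hdrop' (by omega) hndt (by simp at hfuel; omega)]
          rw [hact']
          by_cases hc : budget - 1 ≤ ((actOf t' d).length : Int)
          · rw [if_pos hc, if_pos (by rw [hact, List.length_cons]; push_cast; omega)]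
            have htk : (actOf (p :: t') d).take budget.toNat =
                p :: (actOf t' d).take (budget - 1).toNat := by
              rw [hact]
              have : budget.toNat = (budget - 1).toNat + 1 := by omega
              rw [this, List.take_succ_cons]
            rw [htk]
            simp [qtyAcc]
          · rw [if_neg hc, if_neg (by rw [hact, List.length_cons]; push_cast at hc ⊢; omega)]
            have h1 : decAll (d.insert p.1 (d.getD p.1 0 - 1)) (actOf t' d) =
                decAll d (actOf (p :: t') d) := by rw [hact]; rfl
            have h2 : budget - 1 - ((actOf t' d).length : Int) =
                budget - ((actOf (p :: t') d).length : Int) := by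
              rw [hact, List.length_cons]; push_cast; ring
            have h3 : index + 1 + t'.length = index + (p :: t').length := by simp; omega
            have h4 : f - t'.length = (f + 1) - (p :: t').length := by simp
            rw [h1, h2, h3, h4, hact]
            simp [qtyAcc]
      · rw [if_neg hfreq]
        have hact : actOf (p :: t') d = actOf t' d := by simp [actOf, hfreq]
        by_cases ht' : t' = []
        · subst ht'
          have hact0 : actOf ([] : List (String × Int)) d = [] := rfl
          rw [if_neg (by rw [hact, hact0]; simpa using hb)]
          rw [hact, hact0]
          simp [decAll, qtyAcc, loopA]
        · have hlt : index % s.length + 1 < s.length := by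
            have : 0 < t'.length := List.length_pos_iff.mpr ht'
            omega
          have hmod : (index + 1) % s.length = index % s.length + 1 :=
            mod_succ_lt index s.length hlt
          have hdrop' : s.drop ((index + 1) % s.length) = t' := by
            rw [hmod]; exact drop_succ_of_drop _ _ _ _ hdrop
          rw [ih (index + 1) d budget sel qty f hdrop' (by omega) hndt (by simp at hfuel; omega)]
          rw [hact]
          by_cases hc : budget ≤ ((actOf t' d).length : Int)
          · rw [if_pos hc, if_pos hc]
          · rw [if_neg hc, if_neg hc]
            have h3 : index + 1 + t'.length = index + (p :: t').length := by simp; omega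
            have h4 : f - t'.length = (f + 1) - (p :: t').length := by simp
            rw [h3, h4]
    · rw [if_neg hb]
      have hc : budget ≤ ((actOf (p :: t') d).length : Int) := by
        have : (0 : Int) ≤ ((actOf (p :: t') d).length : Int) := Int.natCast_nonneg _
        omega
      have h0 : budget.toNat = 0 := by omega
      rw [if_pos hc, h0]
      simp [qtyAcc]

lemma decAll_getD (act : List (String × Int)) :
    ∀ (d : PySem.Dict String Int) (k : String), (act.map Prod.fst).Nodup →
      (decAll d act).getD k 0 =
        if k ∈ act.map Prod.fst then d.getD k 0 - 1 else d.getD k 0 := by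
  induction act with
  | nil => intro d k _; simp [decAll]
  | cons q act' ih =>
    intro d k hnd
    simp only [List.map_cons, List.nodup_cons] at hnd
    have hstep : decAll d (q :: act') = decAll (d.insert q.1 (d.getD q.1 0 - 1)) act' := rfl
    rw [hstep, ih _ k hnd.2, PySem.Dict.getD_insert]
    by_cases hq : k = q.1
    · have hk : k ∉ act'.map Prod.fst := hq ▸ hnd.1
      simp [hq, hk]
      exact fun x hx => hnd.1 (List.mem_map.mpr ⟨(q.1, x), hx, rfl⟩)
    · by_cases hk : k ∈ act'.map Prod.fst <;> simp [hq, hk]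

lemma mem_act_keys (s : List (String × Int)) (hnd : (s.map Prod.fst).Nodup)
    (d : PySem.Dict String Int) (p : String × Int) (hp : p ∈ s) :
    p.1 ∈ (actOf s d).map Prod.fst ↔ 0 < d.getD p.1 0 := by
  constructor
  · intro h
    obtain ⟨q, hq, hq1⟩ := List.mem_map.mp h
    have hqs := List.mem_of_mem_filter hq
    have hqpos := List.of_mem_filter hq
    have : q = p := List.inj_on_of_nodup_map hnd hqs hp hq1
    subst this
    simpa using hqpos
  · intro h
    exact List.mem_map.mpr ⟨p, List.mem_filter.mpr ⟨hp, by simpa using h⟩, rfl⟩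

lemma act_keys_nodup (s : List (String × Int)) (hnd : (s.map Prod.fst).Nodup)
    (d : PySem.Dict String Int) : ((actOf s d).map Prod.fst).Nodup := by
  have h1 : (actOf s d).Sublist s := List.filter_sublist
  exact List.Nodup.sublist (h1.map Prod.fst) hnd

lemma actMap_dec (s : List (String × Int)) (hnd : (s.map Prod.fst).Nodup)
    (d : PySem.Dict String Int) :
    ((actMap s d).filter (fun p => decide (1 < p.2))).map (fun p => (p.1, p.2 - 1)) =
      actMap s (decAll d (actOf s d)) := by
  have hgd : ∀ p ∈ s, (decAll d (actOf s d)).getD p.1 0 =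
      if 0 < d.getD p.1 0 then d.getD p.1 0 - 1 else d.getD p.1 0 := by
    intro p hp
    rw [decAll_getD _ _ _ (act_keys_nodup s hnd d)]
    by_cases hpos : 0 < d.getD p.1 0
    · rw [if_pos ((mem_act_keys s hnd d p hp).mpr hpos), if_pos hpos]
    · rw [if_neg (fun h => hpos ((mem_act_keys s hnd d p hp).mp h)), if_neg hpos]
  -- LHS: one filter over s
  rw [actMap, List.filter_map]
  have hff : (actOf s d).filter ((fun p => decide (1 < p.2)) ∘ (fun p => (p.1, d.getD p.1 0))) =
      s.filter (fun p => decide (1 < d.getD p.1 0)) := by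
    rw [actOf, List.filter_filter]
    exact List.filter_congr (fun p _ => by by_cases h : 1 < d.getD p.1 0 <;> simp [h] <;> omega)
  rw [hff]
  -- RHS: same filter, same values
  have hfr : actOf s (decAll d (actOf s d)) =
      s.filter (fun p => decide (1 < d.getD p.1 0)) := by
    rw [show actOf s (decAll d (actOf s d)) =
      s.filter (fun p => decide (0 < (decAll d (actOf s d)).getD p.1 0)) from rfl]
    refine List.filter_congr (fun p hp => ?_)
    rw [hgd p hp]
    by_cases h : 0 < d.getD p.1 0 <;> simp [h] <;> omega
  rw [actMap, hfr, List.map_map]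
  refine List.map_congr_left (fun p hp => ?_)
  have hps : p ∈ s := List.mem_of_mem_filter hp
  have h1 : 1 < d.getD p.1 0 := by simpa using List.of_mem_filter hp
  rw [hgd p hps, if_pos (by omega)]
  simp

lemma sum_map_sub (l : List (String × Int)) (f g : String × Int → Int) :
    (l.map (fun x => f x - g x)).sum = (l.map f).sum - (l.map g).sum := by
  induction l with
  | nil => simp
  | cons a l ih => simp [ih]; ring

lemma posSum_dec (s : List (String × Int)) (hnd : (s.map Prod.fst).Nodup)
    (d : PySem.Dict String Int) :
    posSum s (decAll d (actOf s d)) = posSum s d - (actOf s d).length := by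
  have hgd : ∀ p ∈ s, (decAll d (actOf s d)).getD p.1 0 =
      if 0 < d.getD p.1 0 then d.getD p.1 0 - 1 else d.getD p.1 0 := by
    intro p hp
    rw [decAll_getD _ _ _ (act_keys_nodup s hnd d)]
    by_cases hpos : 0 < d.getD p.1 0
    · rw [if_pos ((mem_act_keys s hnd d p hp).mpr hpos), if_pos hpos]
    · rw [if_neg (fun h => hpos ((mem_act_keys s hnd d p hp).mp h)), if_neg hpos]
  have hpt : ∀ p ∈ s, max ((decAll d (actOf s d)).getD p.1 0) 0 =
      max (d.getD p.1 0) 0 - (if (fun p => decide (0 < d.getD p.1 0)) p then (1 : Int) else 0) := by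
    intro p hp
    rw [hgd p hp]
    by_cases h : 0 < d.getD p.1 0 <;> simp [h] <;> omega
  unfold posSum
  rw [List.map_congr_left hpt, sum_map_sub, PySem.List.sum_map_ite_one_zero]
  rw [List.countP_eq_length_filter]
  rfl

lemma posSum_pos_act_ne (s : List (String × Int)) (d : PySem.Dict String Int)
    (h : 0 < posSum s d) : actOf s d ≠ [] := by
  intro hact
  have hall : ∀ p ∈ s, max (d.getD p.1 0) 0 = 0 := by
    intro p hp
    have : ¬ (0 < d.getD p.1 0) := by
      intro hpos
      have : p ∈ actOf s d := List.mem_filter.mpr ⟨hp, by simpa using hpos⟩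
      simp [hact] at this
    omega
  have : posSum s d = 0 := by
    unfold posSum
    rw [List.map_congr_left hall]
    simp
  omega

lemma loopB_acc_aux : ∀ (N : Nat) (active : List (String × Int)) (budget : Int)
    (sel : List String), budget.toNat ≤ N →
    loopB active budget sel = sel ++ loopB active budget [] := by
  intro N
  induction N with
  | zero =>
    intro active budget sel hN
    rw [loopB.eq_def]; conv_rhs => rw [loopB.eq_def]
    by_cases h : 0 < budget ∧ active ≠ []
    · exact absurd h.1 (by omega)
    · simp [h]
  | succ N ihN =>
    intro active budget sel hN
    rw [loopB.eq_def]; conv_rhs => rw [loopB.eq_def]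
    by_cases h : 0 < budget ∧ active ≠ []
    · simp only [dif_pos h]
      by_cases hlt : budget < (active.length : Int)
      · simp [hlt]
      · simp only [if_neg hlt]
        have hlen : active.length ≠ 0 := fun hl => h.2 (List.length_eq_zero_iff.mp hl)
        have hb : (budget - active.length).toNat ≤ N := by omega
        rw [ihN _ _ (sel ++ active.map (·.1)) hb, ihN _ _ ([] ++ active.map (·.1)) hb]
        simp
    · simp [h]

lemma loopB_acc (active : List (String × Int)) (budget : Int) (sel : List String) :
    loopB active budget sel = sel ++ loopB active budget [] :=
  loopB_acc_aux budget.toNat active budget sel le_rfl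

-- the whole loop of A, from a cycle boundary, is B's loop (with accumulators pulled out)
lemma loopA_eq_loopB (s : List (String × Int)) (hnd : (s.map Prod.fst).Nodup)
    (hn : 0 < s.length) :
    ∀ (N : Nat) (b : Int), b.toNat ≤ N →
      ∀ (d : PySem.Dict String Int) (index : Nat) (sel : List String)
        (qty : PySem.Dict String Int) (fuel : Nat),
      index % s.length = 0 →
      b ≤ posSum s d →
      s.length * (b.toNat + 1) ≤ fuel →
      loopA s fuel d index b sel qty =
        (sel ++ loopB (actMap s d) b [], qtyAcc qty (loopB (actMap s d) b [])) := by
  intro N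
  induction N with
  | zero =>
    intro b hbN d index sel qty fuel hidx hinv hfuel
    have hb : ¬ 0 < b := by omega
    rw [loopA_nonpos _ _ _ _ _ _ _ hb]
    rw [loopB.eq_def, dif_neg (fun h => hb h.1)]
    simp [qtyAcc]
  | succ N ihN =>
    intro b hbN d index sel qty fuel hidx hinv hfuel
    by_cases hb : 0 < b
    · have hfuel1 : s.length ≤ fuel := by
        have h2 : s.length * (b.toNat + 1) = s.length * b.toNat + s.length := by ring
        omega
      have hchunk := loopA_chunk s s index d b sel qty fuel (by rw [hidx]; simp) (by rw [hidx]; simp)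
        hnd hfuel1
      have hact_ne : actOf s d ≠ [] := posSum_pos_act_ne s d (by omega)
      have hlen_pos : 0 < (actOf s d).length := List.length_pos_iff.mpr hact_ne
      have hBne : actMap s d ≠ [] := by
        simp only [actMap, ne_eq, List.map_eq_nil_iff]
        exact hact_ne
      have hlenM : ((actMap s d).length : Int) = ((actOf s d).length : Int) := by
        simp [actMap]
      have hkeys : (actMap s d).map (·.1) = (actOf s d).map (·.1) := by
        simp [actMap]
      rw [hchunk]
      rw [loopB.eq_def, dif_pos ⟨hb, hBne⟩]
      by_cases hle : b ≤ ((actOf s d).length : Int)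
      · rw [if_pos hle]
        by_cases hlt : b < ((actMap s d).length : Int)
        · rw [if_pos hlt]
          have htk : (actMap s d).take b.toNat = ((actOf s d).take b.toNat).map
              (fun p => (p.1, d.getD p.1 0)) := by
            rw [actMap, List.map_take]
          rw [htk, List.nil_append, List.map_map]
          rfl
        · rw [if_neg hlt]
          have hbeq : b = ((actOf s d).length : Int) := by omega
          have hbz : b - ((actMap s d).length : Int) = 0 := by omega
          rw [hbz, List.nil_append]
          rw [loopB.eq_def, dif_neg (by simp)]
          have htk : (actOf s d).take b.toNat = actOf s d := by
            apply List.take_of_length_le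
            omega
          rw [htk, hkeys]
      · rw [if_neg hle]
        have hlen1 : 1 ≤ (actOf s d).length := hlen_pos
        have hbN' : (b - ((actOf s d).length : Int)).toNat ≤ N := by omega
        have hidx' : (index + s.length) % s.length = 0 := by
          rw [Nat.add_mod_right, hidx]
        have hinv' : b - ((actOf s d).length : Int) ≤ posSum s (decAll d (actOf s d)) := by
          rw [posSum_dec s hnd d]
          omega
        have hfuel' : s.length * ((b - ((actOf s d).length : Int)).toNat + 1) ≤
            fuel - s.length := by
          have hm : (b - ((actOf s d).length : Int)).toNat + 1 ≤ b.toNat := by omega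
          have h3 : s.length * ((b - ((actOf s d).length : Int)).toNat + 1) ≤
              s.length * b.toNat := Nat.mul_le_mul_left _ hm
          have h2 : s.length * (b.toNat + 1) = s.length * b.toNat + s.length := by ring
          omega
        rw [ihN _ hbN' (decAll d (actOf s d)) (index + s.length)
          (sel ++ (actOf s d).map (·.1)) (qtyAcc qty ((actOf s d).map (·.1)))
          (fuel - s.length) hidx' hinv' hfuel']
        rw [if_neg (by omega)]
        rw [actMap_dec s hnd d]
        rw [loopB_acc (actMap s (decAll d (actOf s d))) (b - ((actMap s d).length : Int))
          ([] ++ (actMap s d).map (·.1))]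
        rw [hlenM, hkeys, List.nil_append]
        refine Prod.ext ?_ ?_
        · simp [List.append_assoc]
        · simp [qtyAcc, List.foldl_append]
    · rw [loopA_nonpos _ _ _ _ _ _ _ hb]
      rw [loopB.eq_def, dif_neg (fun h => hb h.1)]
      simp [qtyAcc]

-- ===== VERDICT (by name: the statement is the Claim_ definition above) =====
-- the two ports agree: initial-state bookkeeping, then the loop lemma
theorem sample_items_spec : Claim_equal_sample_items := by
  unfold Claim_equal_sample_items
  intro pcd budget _ hpre
  unfold Spec_sample_items sample_items sample_items_alt
  simp only []
  set d0 := PySem.Dict.ofList pcd with hd0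
  set s := PySem.List.sorted d0.items (fun x => x.2) true with hs
  have hperm : s.Perm d0.items := PySem.List.sorted_perm _ _ _
  have hkeynd : (d0.items.map Prod.fst).Nodup := by
    have := PySem.Dict.nodup_keys_ofList (κ := String) (ν := Int) pcd
    simpa [PySem.Dict.keys, hd0] using this
  have hnd : (s.map Prod.fst).Nodup := ((hperm.map Prod.fst).nodup_iff).mpr hkeynd
  have hval : ∀ p ∈ s, d0.getD p.1 0 = p.2 := by
    intro p hp
    have hpi : (p.1, p.2) ∈ d0.items := by
      simpa using hperm.mem_iff.mp hp
    exact PySem.Dict.getD_of_mem_items d0 hpi (by simpa [PySem.Dict.keys] using hkeynd) 0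
  have hposSum : posSum s d0 = (d0.items.map (fun p => max p.2 0)).sum := by
    unfold posSum
    rw [List.map_congr_left (fun p hp => by rw [hval p hp])]
    exact (hperm.map _).sum_eq
  have hinv : budget ≤ posSum s d0 := by
    rw [hposSum]
    exact hpre
  have hactive : s.filter (fun p => decide (0 < p.2)) = actMap s d0 := by
    rw [actMap, actOf]
    have hf : s.filter (fun p => decide (0 < d0.getD p.1 0)) =
        s.filter (fun p => decide (0 < p.2)) :=
      List.filter_congr (fun p hp => by rw [hval p hp])
    rw [hf]
    have hm : (s.filter (fun p => decide (0 < p.2))).map (fun p => (p.1, d0.getD p.1 0)) =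
        (s.filter (fun p => decide (0 < p.2))).map id :=
      List.map_congr_left (fun p hp => by
        rw [hval p (List.mem_of_mem_filter hp)]
        rfl)
    rw [hm, List.map_id]
  by_cases hb : 0 < budget
  · have hsne : s ≠ [] := by
      intro h
      rw [h] at hinv
      simp [posSum] at hinv
      omega
    have hn : 0 < s.length := List.length_pos_iff.mpr hsne
    rw [loopA_eq_loopB s hnd hn budget.toNat budget le_rfl d0 0 [] PySem.Dict.empty
      (s.length * (budget.toNat + 1)) (Nat.zero_mod _) hinv le_rfl]
    rw [hactive]
    simp [qtyAcc]
  · rw [loopA_nonpos _ _ _ _ _ _ _ hb]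
    rw [loopB.eq_def, dif_neg (fun h => hb h.1)]
    rfl
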